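-- pv_equiv track=rewrite | github.com/LittleDan9/markdown-manager | services/backend/app/core/github_security.py | validate_repository_name
-- ===== SOURCE A (Python) =====
-- def validate_repository_name(repo_name: str) -> bool:
--     """Validate GitHub repository name format."""
--     if not repo_name:
--         return False
--
--     # GitHub repository name rules:
--     # - Cannot start with a period or hyphen
--     # - Cannot end with a period
--     # - Cannot contain certain characters
--
--     if repo_name.startswith('.') or repo_name.startswith('-'):
--         return False
--
--     if repo_name.endswith('.'):
--         return False
--
--     # Check for invalid characters
--     invalid_chars = ['<', '>', ':', '"', '|', '?', '*', '\\', '/']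
--     for char in invalid_chars:
--         if char in repo_name:
--             return False
--
--     return True
-- ===== SOURCE B (Python) =====
-- def validate_repository_name(repo_name: str) -> bool:
--     """Validate GitHub repository name format via a 4-state machine run once over the string.
--
--     States: 0 = nothing read yet, 1 = accepting, 2 = last char was '.', 3 = dead.
--     No prefix/suffix checks or substring scans: every rule is encoded in the transitions.
--     """
--     state = 0
--     for c in repo_name:
--         if state == 3 or c in '<>:"|?*\\/' or (state == 0 and c in '.-'):
--             state = 3
--         elif c == '.':
--             state = 2
--         else:
--             state = 1
--     return state == 1
-- ===== Notes on version B (the rewrite author's own statement) =====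
-- stated objective: alternative
-- what changed: Replaced A's guard chain (startswith/endswith tests plus a loop of nine substring searches) by a single left-to-right run of a four-state finite automaton whose transitions encode all the rules, returning whether it ends in the accepting state.
import Mathlib
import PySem

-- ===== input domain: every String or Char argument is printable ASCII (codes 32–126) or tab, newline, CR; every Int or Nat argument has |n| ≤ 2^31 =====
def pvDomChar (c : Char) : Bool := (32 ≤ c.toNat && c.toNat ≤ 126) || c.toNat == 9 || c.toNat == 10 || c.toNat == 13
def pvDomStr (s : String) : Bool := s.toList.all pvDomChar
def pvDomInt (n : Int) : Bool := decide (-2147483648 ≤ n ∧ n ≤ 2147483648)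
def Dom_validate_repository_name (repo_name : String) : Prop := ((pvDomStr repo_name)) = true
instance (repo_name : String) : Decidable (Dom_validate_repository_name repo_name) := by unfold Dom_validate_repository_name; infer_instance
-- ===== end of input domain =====

-- B replaces A's guard chain (startswith/endswith plus nine substring searches) by a single
-- run of a four-state finite automaton over the characters; equivalence proved for every string.

-- ===== PORT A =====
-- A's early-returning 'for char in invalid_chars: if char in repo_name: return False' loop
def pvCheckInvalid (repo_name : String) : List String → Bool
  | [] => true
  | c :: rest => if PySem.Str.isIn c repo_name then false else pvCheckInvalid repo_name rest

def validate_repository_name (repo_name : String) : Bool :=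
  if repo_name = "" then false
  else if PySem.Str.startswith repo_name "." || PySem.Str.startswith repo_name "-" then false
  else if PySem.Str.endswith repo_name "." then false
  else pvCheckInvalid repo_name ["<", ">", ":", "\"", "|", "?", "*", "\\", "/"]

-- ===== PORT B =====
-- c in '<>:"|?*\/'
def pvInvalidChar (x : Char) : Bool :=
  x == '<' || x == '>' || x == ':' || x == '"' || x == '|' || x == '?' || x == '*' || x == '\\' || x == '/'

-- the automaton's transition: 0 = nothing read yet, 1 = accepting, 2 = last char was '.', 3 = dead
def pvStep (s : Nat) (c : Char) : Nat :=
  if s == 3 || pvInvalidChar c || (s == 0 && (c == '.' || c == '-')) then 3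
  else if c == '.' then 2
  else 1

def validate_repository_name_alt (repo_name : String) : Bool :=
  repo_name.toList.foldl pvStep 0 == 1

-- ===== PRECONDITION & SPEC =====
def Spec_validate_repository_name (repo_name : String) (out : Bool) : Prop := out = validate_repository_name_alt repo_name
instance (repo_name : String) (out : Bool) : Decidable (Spec_validate_repository_name repo_name out) := by unfold Spec_validate_repository_name; infer_instance

-- ===== CLAIM (what is proved, stated in full; the proofs are below) =====
def Claim_equal_validate_repository_name : Prop := ∀ (repo_name : String), Dom_validate_repository_name repo_name → Spec_validate_repository_name repo_name (validate_repository_name repo_name)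

-- ===== LEMMAS AND PROOFS =====

-- '[a] is a substring of l' is just membership of a in l
theorem singleton_infix_iff_mem {a : Char} {l : List Char} : [a] <:+: l ↔ a ∈ l := by
  constructor
  · rintro ⟨s, t, rfl⟩; simp
  · intro h
    obtain ⟨s, t, rfl⟩ := List.append_of_mem h
    exact ⟨s, t, by simp⟩

theorem checkInvalid_eq (repo_name : String) (cs : List String) :
    pvCheckInvalid repo_name cs = cs.all (fun c => !PySem.Str.isIn c repo_name) := by
  induction cs with
  | nil => rfl
  | cons c rest ih =>
    simp only [pvCheckInvalid, List.all_cons, ih]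
    cases PySem.Str.isIn c repo_name <;> simp

theorem isIn_singleton_eq (a : Char) (s : String) :
    PySem.Str.isIn (String.ofList [a]) s = decide (a ∈ s.toList) := by
  rcases h : PySem.Str.isIn (String.ofList [a]) s with _ | _
  · have hni : ¬ (String.ofList [a]).toList <:+: s.toList := by
      intro hp
      have := (PySem.Str.isIn_iff_infix _ _).mpr hp
      rw [this] at h; cases h
    symm
    simp only [decide_eq_false_iff_not]
    intro hm; exact hni (by simpa using singleton_infix_iff_mem.mpr hm)
  · have hp := (PySem.Str.isIn_iff_infix _ _).mp h
    simp [singleton_infix_iff_mem.mp (by simpa using hp)]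

-- the nine negated memberships of A equal one character-wise pass
theorem nine_eq (l : List Char) :
    ((!decide ('<' ∈ l)) && ((!decide ('>' ∈ l)) && ((!decide (':' ∈ l)) && ((!decide ('"' ∈ l)) &&
     ((!decide ('|' ∈ l)) && ((!decide ('?' ∈ l)) && ((!decide ('*' ∈ l)) && ((!decide ('\\' ∈ l)) &&
     (!decide ('/' ∈ l)))))))))) = l.all (fun x => !pvInvalidChar x) := by
  rw [Bool.eq_iff_iff]
  simp only [Bool.and_eq_true, Bool.not_eq_true', decide_eq_false_iff_not,
    List.all_eq_true, Bool.not_eq_true', pvInvalidChar]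
  constructor
  · rintro ⟨h1, h2, h3, h4, h5, h6, h7, h8, h9⟩ x hx
    simp only [Bool.or_eq_false_iff, beq_eq_false_iff_ne, ne_eq]
    exact ⟨⟨⟨⟨⟨⟨⟨⟨fun h => h1 (h ▸ hx), fun h => h2 (h ▸ hx)⟩, fun h => h3 (h ▸ hx)⟩,
      fun h => h4 (h ▸ hx)⟩, fun h => h5 (h ▸ hx)⟩, fun h => h6 (h ▸ hx)⟩,
      fun h => h7 (h ▸ hx)⟩, fun h => h8 (h ▸ hx)⟩, fun h => h9 (h ▸ hx)⟩
  · intro hall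
    refine ⟨?_, ?_, ?_, ?_, ?_, ?_, ?_, ?_, ?_⟩ <;>
      · intro hm
        have := hall _ hm
        simp at this

theorem startswith_singleton_cons (a c : Char) (cs : List Char) :
    PySem.Chars.startswith (c :: cs) [a] = (c == a) := by
  rw [Bool.eq_iff_iff, PySem.Chars.startswith_iff]
  simp only [List.cons_prefix_cons, List.nil_prefix, and_true, beq_iff_eq]
  exact eq_comm

theorem endswith_singleton (a : Char) (c : Char) (cs : List Char) :
    PySem.Chars.endswith (c :: cs) [a]
      = ((c :: cs).getLast (List.cons_ne_nil c cs) == a) := by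
  rw [Bool.eq_iff_iff]
  rw [PySem.Chars.endswith_iff]
  constructor
  · rintro ⟨t, ht⟩
    have h1 : (c :: cs).getLast? = some a := by rw [← ht]; exact List.getLast?_concat
    have h2 : (c :: cs).getLast? = some ((c :: cs).getLast (List.cons_ne_nil c cs)) :=
      List.getLast?_eq_some_getLast _
    rw [h1] at h2
    have h3 := Option.some_inj.mp h2
    simp [← h3]
  · intro h
    have h' : (c :: cs).getLast (List.cons_ne_nil c cs) = a := by simpa using h
    refine ⟨(c :: cs).dropLast, ?_⟩
    rw [← h']
    exact List.dropLast_append_getLast (List.cons_ne_nil c cs)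

-- A's value on a nonempty string, as one boolean formula
theorem A_char (c : Char) (cs : List Char) :
    validate_repository_name (String.ofList (c :: cs)) =
      (!(c == '.' || c == '-') && (!((c :: cs).getLast (List.cons_ne_nil c cs) == '.')
        && (c :: cs).all (fun x => !pvInvalidChar x))) := by
  unfold validate_repository_name
  rw [checkInvalid_eq]
  have hne : String.ofList (c :: cs) ≠ "" := by
    intro h
    have := congrArg String.toList h
    simp at this
  rw [if_neg hne]
  simp only [List.all_cons, List.all_nil, Bool.and_true,
    show ("." : String) = String.ofList ['.'] from rfl,
    show ("-" : String) = String.ofList ['-'] from rfl,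
    show ("<" : String) = String.ofList ['<'] from rfl,
    show (">" : String) = String.ofList ['>'] from rfl,
    show (":" : String) = String.ofList [':'] from rfl,
    show ("\"" : String) = String.ofList ['"'] from rfl,
    show ("|" : String) = String.ofList ['|'] from rfl,
    show ("?" : String) = String.ofList ['?'] from rfl,
    show ("*" : String) = String.ofList ['*'] from rfl,
    show ("\\" : String) = String.ofList ['\\'] from rfl,
    show ("/" : String) = String.ofList ['/'] from rfl]
  simp only [PySem.Str.startswith_eq, PySem.Str.endswith_eq, String.toList_ofList,
    isIn_singleton_eq, startswith_singleton_cons, endswith_singleton]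
  rw [nine_eq]
  cases h1 : (c == '.' || c == '-')
  · cases h2 : ((c :: cs).getLast (List.cons_ne_nil c cs) == '.') <;> simp
  · rcases Bool.or_eq_true_iff.mp h1 with h | h <;> simp_all

-- state 3 is absorbing
theorem foldl_step_dead (l : List Char) : l.foldl pvStep 3 = 3 := by
  induction l with
  | nil => rfl
  | cons c cs ih => simpa [pvStep] using ih

-- the automaton's behaviour from a running state (1 or 2)
theorem foldl_step_run (l : List Char) (s : Nat) (hs : s = 1 ∨ s = 2) :
    l.foldl pvStep s =
      if l.any pvInvalidChar then 3
      else match l.getLast? with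
           | none => s
           | some d => if d == '.' then 2 else 1 := by
  induction l generalizing s with
  | nil => simp
  | cons c cs ih =>
    have hstep : pvStep s c = if pvInvalidChar c then 3 else if c == '.' then 2 else 1 := by
      rcases hs with rfl | rfl <;> simp [pvStep]
    rw [List.foldl_cons, hstep]
    by_cases hc : pvInvalidChar c = true
    · simp [hc, foldl_step_dead]
    · simp only [Bool.not_eq_true] at hc
      rw [if_neg (by simp [hc])]
      have hs' : (if c == '.' then 2 else 1) = 1 ∨ (if c == '.' then 2 else 1) = 2 := by
        split
        · exact Or.inr rfl
        · exact Or.inl rfl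
      cases cs with
      | nil =>
        simp only [List.foldl_nil, List.any_cons, List.any_nil, hc, Bool.false_or,
          List.getLast?_singleton]
        split <;> simp_all
      | cons d ds =>
        rw [ih _ hs', List.getLast?_cons_cons,
          List.getLast?_eq_some_getLast (List.cons_ne_nil d ds)]
        simp [List.any_cons, hc]

theorem all_not_eq_not_any (l : List Char) (p : Char → Bool) :
    l.all (fun x => !p x) = !(l.any p) := by
  induction l with
  | nil => rfl
  | cons c cs ih => simp [List.all_cons, List.any_cons, ih]

-- B's value on a nonempty string equals the same boolean formula
theorem B_char (c : Char) (cs : List Char) :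
    validate_repository_name_alt (String.ofList (c :: cs)) =
      (!(c == '.' || c == '-') && (!((c :: cs).getLast (List.cons_ne_nil c cs) == '.')
        && (c :: cs).all (fun x => !pvInvalidChar x))) := by
  unfold validate_repository_name_alt
  rw [String.toList_ofList, List.foldl_cons]
  by_cases hbad : (pvInvalidChar c || (c == '.' || c == '-')) = true
  · have hstep : pvStep 0 c = 3 := by
      unfold pvStep
      rcases Bool.or_eq_true_iff.mp hbad with h | h <;> simp [h]
    rw [hstep, foldl_step_dead]
    rcases Bool.or_eq_true_iff.mp hbad with h | h
    · simp [List.all_cons, h]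
    · simp [h]
  · simp only [Bool.or_eq_true, not_or, Bool.not_eq_true] at hbad
    have hinv := hbad.1
    have hdot := hbad.2.1
    have hdash := hbad.2.2
    have hstep : pvStep 0 c = 1 := by simp [pvStep, hinv, hdot, hdash]
    rw [hstep, foldl_step_run cs 1 (Or.inl rfl)]
    cases cs with
    | nil =>
      simp [hdot, hdash, hinv, List.getLast_singleton]
    | cons d ds =>
      rw [List.getLast?_eq_some_getLast (List.cons_ne_nil d ds)]
      have hlast : (c :: d :: ds).getLast (List.cons_ne_nil c (d :: ds))
          = (d :: ds).getLast (List.cons_ne_nil d ds) := List.getLast_cons _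
      rw [hlast]
      have hall : (c :: d :: ds).all (fun x => !pvInvalidChar x)
          = !((d :: ds).any pvInvalidChar) := by
        simp [List.all_cons, hinv, all_not_eq_not_any]
      rw [hall]
      simp only [hdot, hdash, Bool.or_self, Bool.not_false, Bool.true_and]
      cases hany : (d :: ds).any pvInvalidChar
      · cases hd : ((d :: ds).getLast (List.cons_ne_nil d ds) == '.') <;> simp_all
      · simp

-- ===== VERDICT (by name: the statement is the Claim_ definition above) =====
theorem validate_repository_name_spec : Claim_equal_validate_repository_name := by
  intro repo_name _
  unfold Spec_validate_repository_name
  have hrepr : repo_name = String.ofList repo_name.toList :=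
    String.ofList_toList.symm
  rcases hL : repo_name.toList with _ | ⟨c, cs⟩
  · rw [hL] at hrepr
    rw [hrepr]
    decide
  · rw [hL] at hrepr
    rw [hrepr, A_char, B_char]
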